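-- pv_equiv track=rewrite | github.com/ALetsee/Enigma | test.py | extraer_con_espacios
-- ===== SOURCE A (Python) =====
-- def extraer_con_espacios(texto, alfabeto):
--     chars, antes, invalidos = [], [], []
--     pendientes = 0
--     for c in texto.upper():
--         if c == " ":
--             pendientes += 1
--         elif c in alfabeto:
--             antes.append(pendientes)
--             chars.append(c)
--             pendientes = 0
--         else:
--             invalidos.append(c)
--     trailing = pendientes
--     return chars, antes, trailing, invalidos
-- ===== SOURCE B (Python) =====
-- def extraer_con_espacios(texto, alfabeto):
--     # Filter-then-gap-arithmetic: one pass splits the text into invalid chars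
--     # and a cleaned stream (valid chars + spaces); antes/trailing are then read
--     # off from the positions of the valid chars in the cleaned stream.
--     up = texto.upper()
--     invalidos = [c for c in up if c != " " and c not in alfabeto]
--     cleaned = [c for c in up if c == " " or c in alfabeto]
--     chars = [c for c in cleaned if c != " "]
--     pos = [i for i, c in enumerate(cleaned) if c != " "]
--     antes = [p - q - 1 for p, q in zip(pos, [-1] + pos)]
--     trailing = len(cleaned) - 1 - pos[-1] if pos else len(cleaned)
--     return chars, antes, trailing, invalidos
-- ===== Notes on version B (the rewrite author's own statement) =====
-- stated objective: alternative
-- what changed: A interleaves one stateful loop carrying four accumulators (pending-space counter reset on each valid char); B first filters the uppercased text into invalid chars and a cleaned valid/space stream, then derives antes and trailing by gap arithmetic on the enumerated positions of the valid chars in that stream.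
import Mathlib
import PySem

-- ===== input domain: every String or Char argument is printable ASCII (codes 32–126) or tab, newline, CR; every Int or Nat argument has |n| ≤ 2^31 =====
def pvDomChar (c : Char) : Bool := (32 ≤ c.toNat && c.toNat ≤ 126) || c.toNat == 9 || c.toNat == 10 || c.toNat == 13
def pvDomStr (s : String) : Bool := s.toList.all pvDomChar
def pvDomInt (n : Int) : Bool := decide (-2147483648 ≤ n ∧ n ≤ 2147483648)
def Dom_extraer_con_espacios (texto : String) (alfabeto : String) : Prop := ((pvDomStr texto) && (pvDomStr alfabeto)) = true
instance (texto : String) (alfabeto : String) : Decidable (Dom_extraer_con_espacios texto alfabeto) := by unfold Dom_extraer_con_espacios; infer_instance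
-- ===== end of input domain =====

-- B replaces A's single four-accumulator stateful loop by filter passes plus gap
-- arithmetic on valid-char positions (alternative decomposition, same cost).

-- ===== PORT A =====
-- the loop body of A, with the membership test 'c in alfabeto' abstracted as mem
def pvStepA (mem : Char → Bool) (s : List String × List Int × List String × Int) (c : Char) :
    List String × List Int × List String × Int :=
  if c == ' ' then (s.1, s.2.1, s.2.2.1, s.2.2.2 + 1)
  else if mem c then (s.1 ++ [String.mk [c]], s.2.1 ++ [s.2.2.2], s.2.2.1, 0)
  else (s.1, s.2.1, s.2.2.1 ++ [String.mk [c]], s.2.2.2)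

def extraer_con_espacios (texto : String) (alfabeto : String) : List String × List Int × Int × List String :=
  -- 'c in alfabeto' for the 1-char string c is PySem.Str.isIn (String.mk [c]) alfabeto (exact)
  let st := (PySem.Str.upper texto).toList.foldl
      (pvStepA (fun c => PySem.Str.isIn (String.mk [c]) alfabeto)) ([], [], [], 0)
  (st.1, st.2.1, st.2.2.2, st.2.2.1)

-- ===== PORT B =====
-- pos = [i for i, c in enumerate(cleaned) if c != " "]
def pvPos (cleaned : List Char) : List Int :=
  ((PySem.List.enumerate cleaned).filter (fun ic => !(ic.2 == ' '))).map (·.1)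

-- antes = [p - q - 1 for p, q in zip(pos, [-1] + pos)]
def pvGaps (pos : List Int) : List Int :=
  (pos.zip ((-1 : Int) :: pos)).map (fun pq => pq.1 - pq.2 - 1)

def extraer_con_espacios_alt (texto : String) (alfabeto : String) : List String × List Int × Int × List String :=
  let up := (PySem.Str.upper texto).toList
  let invalidos := (up.filter (fun c => !(c == ' ') && !(PySem.Str.isIn (String.mk [c]) alfabeto))).map
      (fun c => String.mk [c])
  let cleaned := up.filter (fun c => (c == ' ') || PySem.Str.isIn (String.mk [c]) alfabeto)
  let chars := (cleaned.filter (fun c => !(c == ' '))).map (fun c => String.mk [c])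
  let pos := pvPos cleaned
  let antes := pvGaps pos
  let trailing : Int := match pos.getLast? with
    | some q => (cleaned.length : Int) - 1 - q
    | none => (cleaned.length : Int)
  (chars, antes, trailing, invalidos)

-- ===== PRECONDITION & SPEC =====
def Spec_extraer_con_espacios (texto : String) (alfabeto : String) (out : List String × List Int × Int × List String) : Prop := out = extraer_con_espacios_alt texto alfabeto
instance (texto : String) (alfabeto : String) (out : List String × List Int × Int × List String) : Decidable (Spec_extraer_con_espacios texto alfabeto out) := by unfold Spec_extraer_con_espacios; infer_instance

-- ===== CLAIM (what is proved, stated in full; the proofs are below) =====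
def Claim_equal_extraer_con_espacios : Prop := ∀ (texto : String) (alfabeto : String), Dom_extraer_con_espacios texto alfabeto → Spec_extraer_con_espacios texto alfabeto (extraer_con_espacios texto alfabeto)

-- ===== LEMMAS AND PROOFS =====

-- add p pending spaces in front: bumps the first gap, or the trailing count if no gap
def pvPend : List Int × Int → Int → List Int × Int
  | ([], t), p => ([], t + p)
  | (a :: r, t), p => ((a + p) :: r, t)

-- (antes, trailing) of A's loop started with 0 pending spaces
def pvG (mem : Char → Bool) : List Char → List Int × Int
  | [] => ([], 0)
  | c :: l =>
    if c == ' ' then pvPend (pvG mem l) 1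
    else if mem c then (0 :: (pvG mem l).1, (pvG mem l).2)
    else pvG mem l

theorem pvPend_zero (x : List Int × Int) : pvPend x 0 = x := by
  rcases x with ⟨l, t⟩; cases l <;> simp [pvPend]

theorem pvPend_pvPend (x : List Int × Int) (a b : Int) :
    pvPend (pvPend x a) b = pvPend x (a + b) := by
  rcases x with ⟨l, t⟩; cases l <;> simp [pvPend] <;> ring

-- characterisation of A's fold
theorem pvA_fold (mem : Char → Bool) (l : List Char) (chars : List String)
    (antes : List Int) (inv : List String) (p : Int) :
    l.foldl (pvStepA mem) (chars, antes, inv, p) =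
      (chars ++ (l.filter (fun c => !(c == ' ') && mem c)).map (fun c => String.mk [c]),
       antes ++ (pvPend (pvG mem l) p).1,
       inv ++ (l.filter (fun c => !(c == ' ') && !(mem c))).map (fun c => String.mk [c]),
       (pvPend (pvG mem l) p).2) := by
  induction l generalizing chars antes inv p with
  | nil => simp [pvG, pvPend]
  | cons c t ih =>
    by_cases hsp : c == ' '
    · simp only [List.foldl_cons, pvStepA, hsp, if_pos, List.filter_cons, pvG]
      rw [ih]
      simp [hsp, pvPend_pvPend, add_comm]
    · by_cases hm : mem c
      · simp only [List.foldl_cons, pvStepA, hsp, hm, if_pos, Bool.not_false,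
          List.filter_cons, pvG]
        rw [ih]
        rcases hG : pvG mem t with ⟨gl, gt⟩
        cases gl <;> simp [hsp, hm, pvPend, hG]
      · simp only [List.foldl_cons, pvStepA, hsp, hm, if_neg, List.filter_cons, pvG]
        rw [ih]
        simp [hsp, hm]

-- pvG ignores invalid characters
theorem pvG_filter (mem : Char → Bool) (l : List Char) :
    pvG mem (l.filter (fun c => (c == ' ') || mem c)) = pvG mem l := by
  induction l with
  | nil => rfl
  | cons c t ih =>
    by_cases hsp : c == ' '
    · simp [List.filter_cons, hsp, pvG, ih]
    · by_cases hm : mem c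
      · simp [List.filter_cons, hsp, hm, pvG, ih]
      · simp [List.filter_cons, hsp, hm, pvG, ih]

theorem pvGaps_map_succ (xs ys : List Int) :
    ((xs.map (· + 1)).zip ((ys.map (· + 1)))).map (fun pq => pq.1 - pq.2 - 1) =
      (xs.zip ys).map (fun pq => pq.1 - pq.2 - 1) := by
  rw [List.zip_map, List.map_map]
  congr 1
  funext pq
  rcases pq with ⟨a, b⟩
  show (a + 1) - (b + 1) - 1 = a - b - 1
  ring

theorem pvGaps_shift (P : List Int) :
    pvGaps (P.map (· + 1)) = (pvPend (pvGaps P, 0) 1).1 := by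
  cases P with
  | nil => simp [pvGaps, pvPend]
  | cons p rest =>
    have h := pvGaps_map_succ rest (p :: rest)
    simp only [pvGaps, pvPend, List.map_cons, List.zip_cons_cons, List.map_cons,
      List.cons.injEq] at *
    exact ⟨by ring, h⟩

theorem pvMap_add_add (l : List Int) (a b : Int) :
    (l.map (· + a)).map (· + b) = l.map (· + (a + b)) := by
  rw [List.map_map]
  apply List.map_congr_left
  intro x _
  show x + a + b = x + (a + b)
  ring

theorem pvGaps_cons_zero (P : List Int) :
    pvGaps ((0 : Int) :: P.map (· + 1)) = 0 :: pvGaps P := by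
  have h := pvGaps_map_succ P ((-1 : Int) :: P)
  simp only [List.map_cons] at h
  simp only [pvGaps, List.zip_cons_cons, List.map_cons]
  rw [List.cons_eq_cons]
  constructor
  · norm_num
  · rw [show (0 : Int) = -1 + 1 from by norm_num]
    exact h

-- position list with a shifted enumerate start
theorem pvPos_enum_shift (l : List Char) (s : Int) :
    ((PySem.List.enumerate l s).filter (fun ic => !(ic.2 == ' '))).map (·.1) =
      (((PySem.List.enumerate l 0).filter (fun ic => !(ic.2 == ' '))).map (·.1)).map (· + s) := by
  induction l generalizing s with
  | nil => simp [PySem.List.enumerate_nil]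
  | cons c t ih =>
    by_cases hsp : c == ' '
    · simp only [PySem.List.enumerate_cons, List.filter_cons, hsp, Bool.not_true,
        Bool.false_eq_true, if_false, zero_add]
      rw [ih (s + 1), ih 1, pvMap_add_add]
      rw [add_comm (1 : Int) s]
    · simp only [PySem.List.enumerate_cons, List.filter_cons, hsp, Bool.not_false,
        if_true, zero_add, List.map_cons]
      rw [ih (s + 1), ih 1, pvMap_add_add]
      rw [add_comm (1 : Int) s]

theorem pvPos_cons (c : Char) (t : List Char) :
    pvPos (c :: t) = (if c == ' ' then [] else [(0 : Int)]) ++ (pvPos t).map (· + 1) := by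
  unfold pvPos
  rw [show PySem.List.enumerate (c :: t) 0 = (0, c) :: PySem.List.enumerate t 1 from
    PySem.List.enumerate_cons ..]
  by_cases hsp : c == ' ' <;>
    simp [List.filter_cons, hsp, pvPos_enum_shift t 1]

-- main characterisation of pvG on a cleaned list (every char is a space or valid)
theorem pvG_clean (mem : Char → Bool) (l : List Char)
    (h : ∀ c ∈ l, c = ' ' ∨ mem c) :
    pvG mem l = (pvGaps (pvPos l),
      match (pvPos l).getLast? with
      | some q => (l.length : Int) - 1 - q
      | none => (l.length : Int)) := by
  induction l with
  | nil => simp [pvG, pvPos, pvGaps, PySem.List.enumerate_nil]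
  | cons c t ih =>
    have ht : ∀ x ∈ t, x = ' ' ∨ mem x := fun x hx => h x (List.mem_cons_of_mem _ hx)
    rw [pvPos_cons]
    by_cases hsp : c == ' '
    · simp only [pvG, hsp, if_pos, List.nil_append]
      rw [ih ht]
      cases hP : pvPos t with
      | nil =>
        simp [pvGaps, pvPend, List.length_cons]
      | cons p rest =>
        have hs := pvGaps_shift (pvPos t)
        rw [hP] at hs
        have hg : pvGaps (p :: rest) =
            (p - (-1) - 1) :: ((rest.zip (p :: rest)).map (fun pq => pq.1 - pq.2 - 1)) := by
          simp [pvGaps]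
        rw [hg] at hs ⊢
        simp only [pvPend] at hs ⊢
        rw [hs]
        rcases hq : (p :: rest).getLast? with _ | q
        · simp at hq
        · have : ((p :: rest).map (· + 1)).getLast? = some (q + 1) := by
            rw [List.getLast?_map, hq]; rfl
          rw [this]
          simp [List.length_cons]
          push_cast
          ring
    · rcases h c List.mem_cons_self with hc | hm
      · exact absurd (by simp [hc]) hsp
      · simp only [pvG, hsp, hm, if_pos, Bool.false_eq_true, if_false, List.singleton_append]
        rw [ih ht]
        dsimp only
        rw [Prod.mk.injEq]
        have hzero : (0 : Int) :: (pvPos t).map (· + 1) = ((-1 :: pvPos t).map (· + 1)) := by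
          simp
        constructor
        · -- antes component
          show (0 : Int) :: pvGaps (pvPos t) = pvGaps ((0 : Int) :: (pvPos t).map (· + 1))
          exact (pvGaps_cons_zero (pvPos t)).symm
        · -- trailing component
          cases hP : pvPos t with
          | nil => simp [hP, pvGaps, List.length_cons]
          | cons p rest =>
            rcases hq : (p :: rest).getLast? with _ | q
            · simp at hq
            · have h2 : ((p :: rest).map (· + 1)).getLast? = some (q + 1) := by
                rw [List.getLast?_map, hq]; rfl
              have h1 : ((0 : Int) :: (p :: rest).map (· + 1)).getLast? = some (q + 1) := by
                simp only [List.map_cons] at h2 ⊢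
                rw [List.getLast?_cons_cons]
                exact h2
              rw [h1]
              simp [List.length_cons]
              push_cast
              ring

-- ===== VERDICT (by name: the statement is the Claim_ definition above) =====
theorem extraer_con_espacios_spec : Claim_equal_extraer_con_espacios := by
  intro texto alfabeto _
  unfold Spec_extraer_con_espacios
  show extraer_con_espacios texto alfabeto = extraer_con_espacios_alt texto alfabeto
  simp only [extraer_con_espacios, extraer_con_espacios_alt]
  rw [pvA_fold]
  set mem := fun c => PySem.Str.isIn (String.mk [c]) alfabeto with hmem
  set up := (PySem.Str.upper texto).toList with hup
  set cleaned := up.filter (fun c => (c == ' ') || mem c) with hcl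
  have hc : ∀ c ∈ cleaned, c = ' ' ∨ mem c := by
    intro c hcc
    have := List.of_mem_filter hcc
    rcases Bool.or_eq_true_iff.mp this with h | h
    · exact Or.inl (by simpa using h)
    · exact Or.inr h
  have hG : pvG mem up = pvG mem cleaned := (pvG_filter mem up).symm
  have hfil : cleaned.filter (fun c => !(c == ' ')) = up.filter (fun c => !(c == ' ') && mem c) := by
    rw [hcl, List.filter_filter]
    congr 1
    funext c
    by_cases hsp : c == ' ' <;> simp [hsp]
  simp only [List.nil_append, pvPend_zero, hG, pvG_clean mem cleaned hc, hfil]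
  rfl
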